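-- pv_equiv track=rewrite | github.com/kftlfd/leetcode | 2023/2023-02/399-1011-CapacityToShipPackagesWithinDDays.py | canShip
-- ===== SOURCE A (Python) =====
-- from typing import List, Optional
--
-- def canShip(weights: List[int], days: int, capacity: int) -> bool:
--     days_left = days
--     curr_load = 0
--     i = 0
--     l = len(weights)
--     while i < l and days_left > 0:
--         while i < l and curr_load + weights[i] <= capacity:
--             curr_load += weights[i]
--             i += 1
--         days_left -= 1
--         curr_load = 0
--     return i == l
-- ===== SOURCE B (Python) =====
-- def canShip(weights, days, capacity):
--     n = len(weights)
--     if n == 0: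
--         return True
--     # prefix[k] = weights[0] + ... + weights[k-1]
--     prefix = [0]
--     for w in weights:
--         prefix.append(prefix[-1] + w)
--     # range-max segment tree over prefix[1..n]: (max, left_child, right_child)
--     def build(lo, hi):
--         if lo == hi:
--             return (prefix[lo], None, None)
--         mid = (lo + hi) // 2
--         l = build(lo, mid)
--         r = build(mid + 1, hi)
--         return (l[0] if l[0] >= r[0] else r[0], l, r)
--     tree = build(1, n)
--     def first_above(node, lo, hi, start, thr):
--         # leftmost j in [max(lo, start), hi] with prefix[j] > thr, else None
--         if hi < start or node[0] <= thr:
--             return None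
--         if lo == hi:
--             return lo
--         mid = (lo + hi) // 2
--         res = first_above(node[1], lo, mid, start, thr)
--         if res is not None:
--             return res
--         return first_above(node[2], mid + 1, hi, start, thr)
--     d = 0
--     i = 0
--     while i < n:
--         j = first_above(tree, 1, n, i + 1, prefix[i] + capacity)
--         ni = n if j is None else j - 1
--         if ni <= i:
--             return False
--         i = ni
--         d += 1
--     return d <= days
-- ===== Notes on version B (the rewrite author's own statement) =====
-- stated objective: alternative
-- what changed: Replaces A's nested index loops that greedily accumulate a running load while draining a days budget with a staged algorithm: build the prefix-sum array once, build a range-max segment tree over it, and locate each day's chunk boundary by segment-tree descent (leftmost prefix exceeding prefix[i]+capacity), counting the minimum number of days and comparing it to days.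
import Mathlib
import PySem

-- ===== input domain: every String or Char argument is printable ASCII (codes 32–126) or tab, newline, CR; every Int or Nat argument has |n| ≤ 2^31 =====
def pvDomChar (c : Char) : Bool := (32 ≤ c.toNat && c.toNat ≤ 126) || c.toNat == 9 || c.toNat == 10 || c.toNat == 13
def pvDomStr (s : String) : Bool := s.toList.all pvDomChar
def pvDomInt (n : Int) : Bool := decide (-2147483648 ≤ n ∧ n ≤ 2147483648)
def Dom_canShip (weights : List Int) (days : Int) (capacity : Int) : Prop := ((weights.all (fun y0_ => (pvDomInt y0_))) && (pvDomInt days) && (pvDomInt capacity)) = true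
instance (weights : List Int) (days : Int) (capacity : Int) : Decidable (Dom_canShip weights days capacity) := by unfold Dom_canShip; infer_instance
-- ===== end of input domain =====

-- B replaces A's nested greedy loops by prefix sums + a range-max segment tree whose descent finds each day's chunk boundary (alternative algorithm, not claimed faster).
-- The Nat 'fuel' arguments below are totalization guards only (always supplied large enough); each loop is otherwise its Python's code step for step.

-- ===== PORT A =====
-- inner while loop of A: advances i while the next weight still fits into curr_load
def canShipInner (weights : List Int) (capacity : Int) : Nat → Int → Nat → Nat
  | 0, _, i => i
  | fuel + 1, load, i =>
    if i < weights.length ∧ load + weights.getD i 0 ≤ capacity then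
      canShipInner weights capacity fuel (load + weights.getD i 0) (i + 1)
    else i

-- outer while loop of A: one pass of the inner loop per day, curr_load reset to 0
def canShipOuter (weights : List Int) (capacity : Int) : Nat → Nat → Int → Nat
  | 0, i, _ => i
  | fuel + 1, i, d =>
    if i < weights.length ∧ 0 < d then
      canShipOuter weights capacity fuel (canShipInner weights capacity weights.length 0 i) (d - 1)
    else i

def canShip (weights : List Int) (days : Int) (capacity : Int) : Bool :=
  decide (canShipOuter weights capacity days.toNat 0 days = weights.length)

-- ===== PORT B =====
-- Source B's prefix list: prefix = [0]; for w in weights: prefix.append(prefix[-1] + w)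
def mkPrefix (acc : Int) : List Int → List Int
  | [] => [acc]
  | w :: ws => acc :: mkPrefix (acc + w) ws

-- Source B's tuple tree (max, left, right); leaves carry no children
inductive PTree where
  | leaf : Int → PTree
  | node : Int → PTree → PTree → PTree

def PTree.mx : PTree → Int
  | .leaf v => v
  | .node m _ _ => m

-- Source B's build(lo, hi); fuel ≥ hi - lo on every call, so the fuel-0 branch mirrors python's 'lo == hi' leaf
def buildTree (pref : List Int) : Nat → Nat → Nat → PTree
  | 0, lo, _ => .leaf (pref.getD lo 0)
  | fuel + 1, lo, hi =>
    if hi ≤ lo then .leaf (pref.getD lo 0)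
    else
      .node
        (if (buildTree pref fuel ((lo + hi) / 2 + 1) hi).mx ≤ (buildTree pref fuel lo ((lo + hi) / 2)).mx
          then (buildTree pref fuel lo ((lo + hi) / 2)).mx
          else (buildTree pref fuel ((lo + hi) / 2 + 1) hi).mx)
        (buildTree pref fuel lo ((lo + hi) / 2))
        (buildTree pref fuel ((lo + hi) / 2 + 1) hi)

-- Source B's first_above(node, lo, hi, start, thr); python's 'lo == hi' base case is the leaf case on well-formed trees
def firstAbove : PTree → Nat → Nat → Nat → Int → Option Nat
  | .leaf v, lo, hi, start, thr =>
      if hi < start || v ≤ thr then none else some lo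
  | .node m l r, lo, hi, start, thr =>
      if hi < start || m ≤ thr then none
      else
        match firstAbove l lo ((lo + hi) / 2) start thr with
        | some j => some j
        | none => firstAbove r ((lo + hi) / 2 + 1) hi start thr

-- Source B's 'ni = n if j is None else j - 1'
def nextIdx (pref : List Int) (t : PTree) (n i : Nat) (capacity : Int) : Nat :=
  match firstAbove t 1 n (i + 1) (pref.getD i 0 + capacity) with
  | none => n
  | some j => j - 1

-- Source B's final while loop; 'nextIdx … ≤ i' is Source B's 'if ni <= i: return False'
def altLoop (days capacity : Int) (pref : List Int) (t : PTree) (n : Nat) : Nat → Nat → Int → Bool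
  | 0, _, d => decide (d ≤ days)
  | fuel + 1, i, d =>
    if i < n then
      if nextIdx pref t n i capacity ≤ i then false
      else altLoop days capacity pref t n fuel (nextIdx pref t n i capacity) (d + 1)
    else decide (d ≤ days)

def canShip_alt (weights : List Int) (days : Int) (capacity : Int) : Bool :=
  if weights.length = 0 then true
  else
    altLoop days capacity (mkPrefix 0 weights)
      (buildTree (mkPrefix 0 weights) weights.length 1 weights.length)
      weights.length (weights.length + 1) 0 0

-- ===== PRECONDITION & SPEC =====
def Spec_canShip (weights : List Int) (days : Int) (capacity : Int) (out : Bool) : Prop := out = canShip_alt weights days capacity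
instance (weights : List Int) (days : Int) (capacity : Int) (out : Bool) : Decidable (Spec_canShip weights days capacity out) := by unfold Spec_canShip; infer_instance

-- ===== CLAIM (what is proved, stated in full; the proofs are below) =====
def Claim_equal_canShip : Prop := ∀ (weights : List Int) (days : Int) (capacity : Int), Dom_canShip weights days capacity → Spec_canShip weights days capacity (canShip weights days capacity)

-- ===== LEMMAS AND PROOFS =====

-- list-level version of A's inner loop: number of elements it consumes
def innerL (capacity load : Int) : List Int → Nat
  | [] => 0
  | w :: ws => if load + w ≤ capacity then innerL capacity (load + w) ws + 1 else 0

-- list-level version of A's outer loop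
def outerA (capacity : Int) (ws : List Int) (d : Int) : Bool :=
  if h : ws ≠ [] ∧ 0 < d then outerA capacity (ws.drop (innerL capacity 0 ws)) (d - 1)
  else ws.isEmpty
termination_by d.toNat
decreasing_by omega

-- number of extra days (chunk breaks) needed beyond the current one; none if stuck
def bDays (capacity load : Int) : List Int → Option Int
  | [] => some 0
  | w :: ws =>
      if load + w ≤ capacity then bDays capacity (load + w) ws
      else if w ≤ capacity then (bDays capacity w ws).map (· + 1)
      else none

theorem innerL_le (capacity load : Int) (ws : List Int) : innerL capacity load ws ≤ ws.length := by
  induction ws generalizing load with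
  | nil => simp [innerL]
  | cons w ws ih =>
    simp only [innerL, List.length_cons]
    split
    · exact Nat.succ_le_succ (ih _)
    · omega

theorem bDays_nonneg (capacity load : Int) (ws : List Int) (k : Int)
    (h : bDays capacity load ws = some k) : 0 ≤ k := by
  induction ws generalizing load k with
  | nil => simp [bDays] at h; omega
  | cons w ws ih =>
    simp only [bDays] at h
    split at h
    · exact ih _ _ h
    · split at h
      · rcases Option.map_eq_some_iff.mp h with ⟨k', hk', rfl⟩
        have := ih _ _ hk'; omega
      · exact absurd h (by simp)

-- the greedy chunk: bDays from load 0 factors through the elements innerL consumes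
theorem bDays_chunk (capacity load : Int) (ws : List Int) :
    bDays capacity load ws =
      match ws.drop (innerL capacity load ws) with
      | [] => some 0
      | w' :: rest' => if w' ≤ capacity then (bDays capacity w' rest').map (· + 1) else none := by
  induction ws generalizing load with
  | nil => simp [innerL, bDays]
  | cons w ws ih =>
    simp only [innerL, bDays]
    split
    · simpa using ih (load + w)
    · rfl

theorem canShipInner_eq (weights : List Int) (capacity : Int) :
    ∀ (fuel : Nat) (load : Int) (i : Nat), weights.length - i ≤ fuel →
      canShipInner weights capacity fuel load i = i + innerL capacity load (weights.drop i) := by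
  intro fuel
  induction fuel with
  | zero =>
    intro load i h
    have hge : weights.length ≤ i := by omega
    rw [List.drop_eq_nil_of_le hge]
    simp [canShipInner, innerL]
  | succ fuel ih =>
    intro load i h
    simp only [canShipInner]
    by_cases hc : i < weights.length ∧ load + weights.getD i 0 ≤ capacity
    · rw [if_pos hc]
      obtain ⟨hi, hle⟩ := hc
      have hget : weights.getD i 0 = weights[i] := List.getD_eq_getElem _ _ hi
      rw [ih (load + weights.getD i 0) (i + 1) (by omega)]
      rw [hget] at hle ⊢
      rw [List.drop_eq_getElem_cons hi]
      simp only [innerL]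
      rw [if_pos hle]
      omega
    · rw [if_neg hc]
      rcases Nat.lt_or_ge i weights.length with hi | hi
      · have hget : weights.getD i 0 = weights[i] := List.getD_eq_getElem _ _ hi
        have hnle : ¬ (load + weights[i] ≤ capacity) := fun hcon => hc ⟨hi, by rwa [hget]⟩
        rw [List.drop_eq_getElem_cons hi]
        simp only [innerL]
        rw [if_neg hnle]
        omega
      · rw [List.drop_eq_nil_of_le hi]
        simp [innerL]

-- the stopped outer loop against outerA
theorem outerA_stop (weights : List Int) (capacity : Int) (i : Nat) (d : Int)
    (hi : i ≤ weights.length) (hd : ¬ (i < weights.length ∧ 0 < d)) :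
    decide (i = weights.length) = outerA capacity (weights.drop i) d := by
  rcases Nat.lt_or_ge i weights.length with hlt | hge
  · have hdn : ¬ 0 < d := fun h => hd ⟨hlt, h⟩
    have hne : weights.drop i ≠ [] := by
      rw [ne_eq, List.drop_eq_nil_iff]
      omega
    rw [outerA, dif_neg (by tauto)]
    have h1 : decide (i = weights.length) = false := by
      simp
      omega
    have h2 : (weights.drop i).isEmpty = false := by simp [hne]
    rw [h1, h2]
  · have hnil : weights.drop i = [] := List.drop_eq_nil_of_le hge
    rw [hnil, outerA, dif_neg (by simp)]
    simp
    omega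

theorem canShipOuter_eq (weights : List Int) (capacity : Int) :
    ∀ (fuel : Nat) (i : Nat) (d : Int), i ≤ weights.length → d ≤ (fuel : Int) →
      decide (canShipOuter weights capacity fuel i d = weights.length) =
        outerA capacity (weights.drop i) d := by
  intro fuel
  induction fuel with
  | zero =>
    intro i d hi hd
    simp only [canShipOuter]
    exact outerA_stop weights capacity i d hi (by omega)
  | succ fuel ih =>
    intro i d hi hd
    by_cases hc : i < weights.length ∧ 0 < d
    · have hstep : canShipOuter weights capacity (fuel + 1) i d =
          canShipOuter weights capacity fuel (canShipInner weights capacity weights.length 0 i) (d - 1) := by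
        simp only [canShipOuter]
        rw [if_pos hc]
      have hinner := canShipInner_eq weights capacity weights.length 0 i (by omega)
      have hle := innerL_le capacity 0 (weights.drop i)
      have hld : (weights.drop i).length = weights.length - i := List.length_drop
      have hi' : canShipInner weights capacity weights.length 0 i ≤ weights.length := by omega
      have hne : weights.drop i ≠ [] := by
        rw [ne_eq, List.drop_eq_nil_iff]
        omega
      rw [outerA, dif_pos ⟨hne, hc.2⟩]
      rw [hstep, ih (canShipInner weights capacity weights.length 0 i) (d - 1) hi' (by omega)]
      rw [hinner, List.drop_drop]
    · have hstep : canShipOuter weights capacity (fuel + 1) i d = i := by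
        simp only [canShipOuter]
        rw [if_neg hc]
      rw [hstep]
      exact outerA_stop weights capacity i d hi hc

theorem outerA_char (capacity : Int) (ws : List Int) (d : Int) :
    outerA capacity ws d =
      (ws.isEmpty ||
        match bDays capacity 0 ws with
        | some k => decide (1 + k ≤ d)
        | none => false) := by
  fun_induction outerA capacity ws d with
  | case1 ws d h ih =>
    obtain ⟨hne, hd⟩ := h
    have hwse : ws.isEmpty = false := by simp [hne]
    rw [ih, bDays_chunk capacity 0 ws, hwse]
    rcases hdrop : ws.drop (innerL capacity 0 ws) with _ | ⟨w', rest'⟩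
    · simp
      omega
    · simp only [List.isEmpty_cons, Bool.false_or]
      by_cases hw : w' ≤ capacity
      · have hb0 : bDays capacity 0 (w' :: rest') = bDays capacity w' rest' := by
          simp only [bDays, zero_add]
          rw [if_pos hw]
        rw [hb0, if_pos hw]
        rcases hb : bDays capacity w' rest' with _ | k
        · rfl
        · simp only [Option.map_some, decide_eq_decide]
          omega
      · have hb0 : bDays capacity 0 (w' :: rest') = none := by
          simp only [bDays, zero_add]
          rw [if_neg hw, if_neg hw]
        rw [hb0, if_neg hw]
  | case2 ws d h =>
    rcases ws with _ | ⟨w, ws'⟩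
    · simp
    · have hd : ¬ 0 < d := fun hd => h ⟨by simp, hd⟩
      simp only [List.isEmpty_cons, Bool.false_or]
      rcases hb : bDays capacity 0 (w :: ws') with _ | k
      · rfl
      · have hk := bDays_nonneg capacity 0 (w :: ws') k hb
        have hnd : ¬ (1 + k ≤ d) := by omega
        simp [hnd]

-- ===== B-side lemmas =====

theorem mx_node (m : Int) (l r : PTree) : (PTree.node m l r).mx = m := rfl

theorem mx_leaf (v : Int) : (PTree.leaf v).mx = v := rfl

theorem mkPrefix_getD (ws : List Int) (a : Int) (j : Nat) (hj : j ≤ ws.length) :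
    (mkPrefix a ws).getD j 0 = a + (ws.take j).sum := by
  induction ws generalizing a j with
  | nil =>
    have : j = 0 := by simpa using hj
    subst this
    simp [mkPrefix]
  | cons w ws ih =>
    rcases j with _ | j
    · simp [mkPrefix]
    · simp only [mkPrefix, List.getD_cons_succ, List.take_succ_cons, List.sum_cons]
      rw [ih (a + w) j (by simpa using hj)]
      ring

theorem buildTree_mx_ge (pref : List Int) :
    ∀ (fuel lo hi : Nat), hi - lo ≤ fuel →
      ∀ j, lo ≤ j → j ≤ hi → pref.getD j 0 ≤ (buildTree pref fuel lo hi).mx := by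
  intro fuel
  induction fuel with
  | zero =>
    intro lo hi hf j h1 h2
    have : j = lo := by omega
    subst this
    simp only [buildTree, mx_leaf]
    exact le_rfl
  | succ fuel ih =>
    intro lo hi hf j h1 h2
    simp only [buildTree]
    by_cases hlo : hi ≤ lo
    · rw [if_pos hlo]
      have : j = lo := by omega
      subst this
      rw [mx_leaf]
    · rw [if_neg hlo, mx_node]
      rcases Nat.lt_or_ge ((lo + hi) / 2) j with hj | hj
      · have := ih ((lo + hi) / 2 + 1) hi (by omega) j (by omega) h2
        split <;> omega
      · have := ih lo ((lo + hi) / 2) (by omega) j h1 hj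
        split <;> omega

-- python's first_above on a leaf (lo == hi)
theorem fa_leaf_none (pref : List Int) (lo hi start : Nat) (thr : Int) (hlh : lo = hi)
    (hres : firstAbove (PTree.leaf (pref.getD lo 0)) lo hi start thr = none) :
    ∀ k, lo ≤ k → start ≤ k → k ≤ hi → pref.getD k 0 ≤ thr := by
  intro k h1 h2 h3
  have hk : k = lo := by omega
  rw [hk]
  simp only [firstAbove] at hres
  by_cases hc : (decide (hi < start) || decide (pref.getD lo 0 ≤ thr)) = true
  · rcases Bool.or_eq_true_iff.mp hc with h | h
    · simp only [decide_eq_true_eq] at h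
      omega
    · simpa using h
  · rw [if_neg hc] at hres
    exact absurd hres (by simp)

theorem fa_leaf_some (pref : List Int) (lo hi start : Nat) (thr : Int) (j : Nat) (hlh : lo = hi)
    (hres : firstAbove (PTree.leaf (pref.getD lo 0)) lo hi start thr = some j) :
    lo ≤ j ∧ start ≤ j ∧ j ≤ hi ∧ thr < pref.getD j 0 ∧
      ∀ k, lo ≤ k → start ≤ k → k < j → pref.getD k 0 ≤ thr := by
  simp only [firstAbove] at hres
  by_cases hc : (decide (hi < start) || decide (pref.getD lo 0 ≤ thr)) = true
  · rw [if_pos hc] at hres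
    exact absurd hres (by simp)
  · rw [if_neg hc] at hres
    injection hres with hj
    subst hj
    simp only [Bool.or_eq_true, decide_eq_true_eq, not_or] at hc
    exact ⟨le_refl _, by omega, by omega, by omega, fun k hk1 hk2 hk3 => by omega⟩

theorem firstAbove_none (pref : List Int) :
    ∀ (fuel lo hi start : Nat) (thr : Int), hi - lo ≤ fuel → lo ≤ hi →
      firstAbove (buildTree pref fuel lo hi) lo hi start thr = none →
      ∀ k, lo ≤ k → start ≤ k → k ≤ hi → pref.getD k 0 ≤ thr := by
  intro fuel
  induction fuel with
  | zero =>
    intro lo hi start thr hf hlh hres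
    exact fa_leaf_none pref lo hi start thr (by omega) hres
  | succ fuel ih =>
    intro lo hi start thr hf hlh hres
    simp only [buildTree] at hres
    by_cases hlo : hi ≤ lo
    · rw [if_pos hlo] at hres
      exact fa_leaf_none pref lo hi start thr (by omega) hres
    · rw [if_neg hlo] at hres
      intro k h1 h2 h3
      simp only [firstAbove] at hres
      by_cases hp : (decide (hi < start) ||
          decide ((if (buildTree pref fuel ((lo + hi) / 2 + 1) hi).mx ≤ (buildTree pref fuel lo ((lo + hi) / 2)).mx
            then (buildTree pref fuel lo ((lo + hi) / 2)).mx
            else (buildTree pref fuel ((lo + hi) / 2 + 1) hi).mx) ≤ thr)) = true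
      · rcases Bool.or_eq_true_iff.mp hp with h | h
        · simp only [decide_eq_true_eq] at h
          omega
        · simp only [decide_eq_true_eq] at h
          have hge := buildTree_mx_ge pref (fuel + 1) lo hi (by omega) k h1 h3
          simp only [buildTree] at hge
          rw [if_neg hlo, mx_node] at hge
          omega
      · rw [if_neg hp] at hres
        rcases hL : firstAbove (buildTree pref fuel lo ((lo + hi) / 2)) lo ((lo + hi) / 2) start thr with _ | j
        · rw [hL] at hres
          change firstAbove (buildTree pref fuel ((lo + hi) / 2 + 1) hi) ((lo + hi) / 2 + 1) hi start thr
            = none at hres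
          rcases Nat.lt_or_ge ((lo + hi) / 2) k with hk | hk
          · exact ih ((lo + hi) / 2 + 1) hi start thr (by omega) (by omega) hres k (by omega) h2 h3
          · exact ih lo ((lo + hi) / 2) start thr (by omega) (by omega) hL k h1 h2 hk
        · rw [hL] at hres
          exact absurd hres (by simp)

theorem firstAbove_some (pref : List Int) :
    ∀ (fuel lo hi start : Nat) (thr : Int) (j : Nat), hi - lo ≤ fuel → lo ≤ hi →
      firstAbove (buildTree pref fuel lo hi) lo hi start thr = some j →
      lo ≤ j ∧ start ≤ j ∧ j ≤ hi ∧ thr < pref.getD j 0 ∧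
        ∀ k, lo ≤ k → start ≤ k → k < j → pref.getD k 0 ≤ thr := by
  intro fuel
  induction fuel with
  | zero =>
    intro lo hi start thr j hf hlh hres
    exact fa_leaf_some pref lo hi start thr j (by omega) hres
  | succ fuel ih =>
    intro lo hi start thr j hf hlh hres
    simp only [buildTree] at hres
    by_cases hlo : hi ≤ lo
    · rw [if_pos hlo] at hres
      exact fa_leaf_some pref lo hi start thr j (by omega) hres
    · rw [if_neg hlo] at hres
      simp only [firstAbove] at hres
      by_cases hp : (decide (hi < start) ||
          decide ((if (buildTree pref fuel ((lo + hi) / 2 + 1) hi).mx ≤ (buildTree pref fuel lo ((lo + hi) / 2)).mx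
            then (buildTree pref fuel lo ((lo + hi) / 2)).mx
            else (buildTree pref fuel ((lo + hi) / 2 + 1) hi).mx) ≤ thr)) = true
      · rw [if_pos hp] at hres
        exact absurd hres (by simp)
      · rw [if_neg hp] at hres
        rcases hL : firstAbove (buildTree pref fuel lo ((lo + hi) / 2)) lo ((lo + hi) / 2) start thr with _ | j'
        · rw [hL] at hres
          change firstAbove (buildTree pref fuel ((lo + hi) / 2 + 1) hi) ((lo + hi) / 2 + 1) hi start thr
            = some j at hres
          obtain ⟨a1, a2, a3, a4, a5⟩ := ih ((lo + hi) / 2 + 1) hi start thr j (by omega) (by omega) hres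
          refine ⟨by omega, a2, a3, a4, ?_⟩
          intro k hk1 hk2 hk3
          rcases Nat.lt_or_ge ((lo + hi) / 2) k with hk | hk
          · exact a5 k (by omega) hk2 hk3
          · exact firstAbove_none pref fuel lo ((lo + hi) / 2) start thr (by omega) (by omega) hL k hk1 hk2 hk
        · rw [hL] at hres
          change some j' = some j at hres
          injection hres with hj
          subst hj
          obtain ⟨a1, a2, a3, a4, a5⟩ := ih lo ((lo + hi) / 2) start thr j' (by omega) (by omega) hL
          exact ⟨a1, a2, by omega, a4, fun k hk1 hk2 hk3 => a5 k hk1 hk2 hk3⟩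

-- the take-of-drop sum identity used to translate chunk sums into prefix differences
theorem sum_take_drop (weights : List Int) (i k : Nat) :
    ((weights.drop i).take k).sum = (weights.take (i + k)).sum - (weights.take i).sum := by
  rw [List.take_add, List.sum_append]
  ring

-- scanning facts about A's inner loop, as bounds on partial sums
theorem innerL_spec (capacity : Int) (ws : List Int) :
    ∀ load,
      (∀ k, k < innerL capacity load ws → load + (ws.take (k + 1)).sum ≤ capacity) ∧
      (innerL capacity load ws < ws.length →
        capacity < load + (ws.take (innerL capacity load ws + 1)).sum) := by
  induction ws with
  | nil =>
    intro load
    exact ⟨by intro k hk; simp [innerL] at hk, by intro h; simp [innerL] at h⟩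
  | cons w ws ih =>
    intro load
    constructor
    · intro k hk
      simp only [innerL] at hk ⊢
      split at hk
      · rename_i hle
        rcases k with _ | k
        · simpa using hle
        · have := (ih (load + w)).1 k (by omega)
          simp only [List.take_succ_cons, List.sum_cons]
          omega
      · omega
    · intro hlen
      simp only [innerL] at hlen ⊢
      split at hlen
      · rename_i hle
        rw [if_pos hle]
        have := (ih (load + w)).2 (by simpa using hlen)
        simp only [List.take_succ_cons, List.sum_cons]
        omega
      · rename_i hle
        rw [if_neg hle]
        simp only [List.take_succ_cons, List.take_zero, List.sum_cons, List.sum_nil]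
        omega

-- the segment-tree descent finds exactly the boundary A's inner loop reaches
theorem nextIdx_eq (weights : List Int) (capacity : Int) (i : Nat)
    (hi : i < weights.length) :
    nextIdx (mkPrefix 0 weights) (buildTree (mkPrefix 0 weights) weights.length 1 weights.length)
        weights.length i capacity
      = i + innerL capacity 0 (weights.drop i) := by
  set n := weights.length with hn
  set pref := mkPrefix 0 weights with hpref
  set m := innerL capacity 0 (weights.drop i) with hm
  have hmle : m ≤ n - i := by
    have := innerL_le capacity 0 (weights.drop i)
    simp only [List.length_drop] at this
    omega
  have hgetD : ∀ j, j ≤ n → pref.getD j 0 = (weights.take j).sum := by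
    intro j hj
    rw [hpref, mkPrefix_getD weights 0 j hj]
    ring
  have hsums := innerL_spec capacity (weights.drop i) 0
  rw [← hm] at hsums
  have hin : ∀ j, i + 1 ≤ j → j ≤ i + m → pref.getD j 0 ≤ pref.getD i 0 + capacity := by
    intro j h1 h2
    have hss := hsums.1 (j - i - 1) (by omega)
    rw [sum_take_drop] at hss
    have hj : i + (j - i - 1 + 1) = j := by omega
    rw [hj] at hss
    rw [hgetD j (by omega), hgetD i (by omega)]
    omega
  have hout : m < n - i → pref.getD i 0 + capacity < pref.getD (i + m + 1) 0 := by
    intro hlt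
    have hss := hsums.2 (by simp only [List.length_drop]; omega)
    rw [sum_take_drop] at hss
    have hj : i + (m + 1) = i + m + 1 := by omega
    rw [hj] at hss
    rw [hgetD (i + m + 1) (by omega), hgetD i (by omega)]
    omega
  unfold nextIdx
  rcases hres : firstAbove (buildTree pref n 1 n) 1 n (i + 1) (pref.getD i 0 + capacity)
      with _ | j
  · show n = i + m
    have hnone := firstAbove_none pref n 1 n (i + 1) (pref.getD i 0 + capacity)
      (by omega) (by omega) hres
    by_contra hne
    have hmlt : m < n - i := by omega
    have h1 := hnone (i + m + 1) (by omega) (by omega) (by omega)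
    have h2 := hout hmlt
    omega
  · show j - 1 = i + m
    obtain ⟨a1, a2, a3, a4, a5⟩ :=
      firstAbove_some pref n 1 n (i + 1) (pref.getD i 0 + capacity) j (by omega) (by omega) hres
    have hge : j - 1 - i ≤ m := by
      by_contra hcon
      have hmlt : m < n - i := by omega
      have h1 := a5 (i + m + 1) (by omega) (by omega) (by omega)
      have h2 := hout hmlt
      omega
    have hle2 : m ≤ j - 1 - i := by
      by_contra hcon
      have := hin j a2 (by omega)
      omega
    omega

theorem altLoop_done (days capacity : Int) (pref : List Int) (t : PTree) (n : Nat) :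
    ∀ (fuel i : Nat) (d : Int), n ≤ i →
      altLoop days capacity pref t n fuel i d = decide (d ≤ days) := by
  intro fuel i d h
  cases fuel with
  | zero => rfl
  | succ fuel => simp only [altLoop]; rw [if_neg (by omega)]

-- B's loop counts chunks and compares with days: characterised by bDays
theorem altLoop_eq (weights : List Int) (days capacity : Int) :
    ∀ (fuel i : Nat) (d : Int), i < weights.length → weights.length - i < fuel →
      altLoop days capacity (mkPrefix 0 weights)
          (buildTree (mkPrefix 0 weights) weights.length 1 weights.length)
          weights.length fuel i d =
        match bDays capacity 0 (weights.drop i) with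
        | some k => decide (d + 1 + k ≤ days)
        | none => false := by
  intro fuel
  induction fuel with
  | zero =>
    intro i d hi hf
    omega
  | succ fuel ih =>
    intro i d hi hf
    simp only [altLoop]
    rw [if_pos hi, nextIdx_eq weights capacity i hi]
    set m := innerL capacity 0 (weights.drop i) with hm
    have hmle : m ≤ weights.length - i := by
      have := innerL_le capacity 0 (weights.drop i)
      simp only [List.length_drop] at this
      omega
    have hchunk := bDays_chunk capacity 0 (weights.drop i)
    rw [← hm, List.drop_drop] at hchunk
    by_cases hstuck : i + m ≤ i
    · rw [if_pos hstuck]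
      have hm0 : m = 0 := by omega
      rcases hd : weights.drop i with _ | ⟨w, rest⟩
      · exact absurd hd (by rw [List.drop_eq_nil_iff]; omega)
      · have hw : ¬ ((0 : Int) + w ≤ capacity) := by
          by_contra hcon
          rw [hd] at hm
          simp only [innerL, if_pos hcon] at hm
          omega
        simp only [bDays]
        rw [if_neg hw, if_neg (by omega : ¬ w ≤ capacity)]
    · rw [if_neg hstuck]
      have hmpos : 1 ≤ m := by omega
      rcases Nat.lt_or_ge (i + m) weights.length with hlt | hge
      · rw [ih (i + m) (d + 1) hlt (by omega)]
        rcases hd : weights.drop (i + m) with _ | ⟨w', rest'⟩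
        · exact absurd hd (by rw [List.drop_eq_nil_iff]; omega)
        · rw [hd] at hchunk
          have hchunk2 : bDays capacity 0 (weights.drop i) =
              if w' ≤ capacity then (bDays capacity w' rest').map (· + 1) else none := hchunk
          by_cases hw : w' ≤ capacity
          · have hb : bDays capacity 0 (w' :: rest') = bDays capacity w' rest' := by
              simp only [bDays, zero_add]
              rw [if_pos hw]
            rw [hchunk2, if_pos hw, hb]
            rcases hbv : bDays capacity w' rest' with _ | k
            · rfl
            · simp only [Option.map_some, decide_eq_decide]
              omega
          · have hb : bDays capacity 0 (w' :: rest') = none := by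
              simp only [bDays, zero_add]
              rw [if_neg hw, if_neg hw]
            rw [hchunk2, if_neg hw, hb]
      · have hd : weights.drop (i + m) = [] := List.drop_eq_nil_of_le hge
        rw [hd] at hchunk
        have hsome : bDays capacity 0 (weights.drop i) = some 0 := by rw [hchunk]
        rw [hsome, altLoop_done days capacity _ _ _ fuel (i + m) (d + 1) (by omega)]
        simp only [decide_eq_decide]
        omega

-- ===== VERDICT (by name: the statement is the Claim_ definition above) =====
theorem canShip_spec : Claim_equal_canShip := by
  intro weights days capacity _
  unfold Spec_canShip canShip canShip_alt
  rw [canShipOuter_eq weights capacity days.toNat 0 days (Nat.zero_le _) (Int.self_le_toNat days),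
    List.drop_zero, outerA_char]
  by_cases hw : weights.length = 0
  · rw [if_pos hw]
    have : weights = [] := List.eq_nil_of_length_eq_zero hw
    subst this
    simp
  · rw [if_neg hw, altLoop_eq weights days capacity (weights.length + 1) 0 0 (by omega) (by omega),
      List.drop_zero]
    have hne : weights.isEmpty = false := by
      rcases weights with _ | ⟨w, ws⟩
      · simp at hw
      · simp
    rw [hne]
    simp only [Bool.false_or]
    rcases hb : bDays capacity 0 weights with _ | k
    · rfl
    · show decide (1 + k ≤ days) = decide (0 + 1 + k ≤ days)
      simp only [decide_eq_decide]
      omega
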